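-- pv_equiv track=rewrite | github.com/tdnguyen6/hacker-earth | reversed-linked-list/main.py | solve
-- ===== SOURCE A (Python) =====
-- from collections import deque
--
-- def solve(*args):
--     N, A = args
--     B = A[:]
--     tmp = deque()
--     start = -1
--     for i in range(N):
--         if B[i] % 2 == 0:
--             if start == -1:
--                 start = i
--             tmp.appendleft(B[i])
--             if len(tmp) > 1 and i == N - 1:
--                 A = A[:start] + list(tmp)
--         else:
--             if len(tmp) > 0 and start >= 0:
--                 if len(tmp) > 1:
--                     A = A[:start] + list(tmp) + A[i:]
--
--                 tmp.clear()
--                 start = -1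
--
--     return " ".join(map(str, A))
-- ===== SOURCE B (Python) =====
-- def solve(N, A):
--     n = max(N, 0)
--     out = []
--     run = []
--     for x in A[:n]:
--         if x % 2 == 0:
--             run.append(x)
--         else:
--             out.extend(reversed(run))
--             run = []
--             out.append(x)
--     out.extend(reversed(run))
--     out.extend(A[n:])
--     return " ".join(map(str, out))
-- ===== Notes on version B (the rewrite author's own statement) =====
-- stated objective: faster
-- what changed: B makes a single pass accumulating the current even run and flushing it reversed, instead of A's repeated whole-list slicing and rebuilding at every run boundary.
-- intended difference: When only the first N elements of a longer list are processed and the scan ends inside an even run of length >= 2 (A[N-2] and A[N-1] both even, N < len(A)), A's final-flush 'A = A[:start] + list(tmp)' silently drops the untouched tail A[N:], while B keeps it; keeping the unprocessed tail is clearly the intended value. — e.g. on solve(2, [2, 4, 7]): A returns "4 2", B returns "4 2 7"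
import Mathlib
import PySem

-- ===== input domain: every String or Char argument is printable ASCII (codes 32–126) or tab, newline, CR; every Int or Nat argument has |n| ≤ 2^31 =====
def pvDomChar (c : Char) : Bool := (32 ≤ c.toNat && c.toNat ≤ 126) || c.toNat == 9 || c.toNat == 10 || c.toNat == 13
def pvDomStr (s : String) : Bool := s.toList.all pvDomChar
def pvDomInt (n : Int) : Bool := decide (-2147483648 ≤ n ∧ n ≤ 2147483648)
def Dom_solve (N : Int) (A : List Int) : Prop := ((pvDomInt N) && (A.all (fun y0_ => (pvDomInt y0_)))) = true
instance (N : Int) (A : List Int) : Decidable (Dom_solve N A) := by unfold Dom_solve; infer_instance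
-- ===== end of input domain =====

set_option maxRecDepth 4000

-- B replaces A's repeated whole-list slicing at every run boundary by a single pass that flushes
-- each maximal even run reversed; return values only are compared (neither version mutates its input).
-- ===== PORT A =====
-- one loop iteration of A: state is (A, tmp, start); deque.appendleft = cons, list(tmp) = tmp
def solveStep (N : Int) (B : List Int) (st : List Int × List Int × Int) (i : Int) :
    List Int × List Int × Int :=
  let Acur := st.1
  let tmp := st.2.1
  let start := st.2.2
  let x := PySem.List.pyGetD B i 0   -- B[i]; in range on every input admitted by Pre_solve
  if PySem.Int.mod x 2 = 0 then
    let start' := if start = -1 then i else start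
    let tmp' := x :: tmp
    let Acur' := if 1 < tmp'.length ∧ i = N - 1
      then PySem.List.slice Acur none (some start') ++ tmp'
      else Acur
    (Acur', tmp', start')
  else
    if 0 < tmp.length ∧ 0 ≤ start then
      let Acur' := if 1 < tmp.length
        then PySem.List.slice Acur none (some start) ++ tmp ++ PySem.List.slice Acur (some i) none
        else Acur
      (Acur', [], -1)
    else
      (Acur, tmp, start)

def solve (N : Int) (A : List Int) : String :=
  let st := (PySem.List.pyRange 0 N 1).foldl (solveStep N A) (A, [], -1)
  PySem.Str.join " " (st.1.map PySem.Int.toStr)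

-- ===== PORT B =====
def altStep (st : List Int × List Int) (x : Int) : List Int × List Int :=
  if PySem.Int.mod x 2 = 0 then (st.1, st.2 ++ [x])
  else (st.1 ++ st.2.reverse ++ [x], [])

def solve_alt (N : Int) (A : List Int) : String :=
  let n := max N 0
  let st := (PySem.List.slice A none (some n)).foldl altStep ([], [])
  PySem.Str.join " " ((st.1 ++ st.2.reverse ++ PySem.List.slice A (some n) none).map PySem.Int.toStr)

-- ===== PRECONDITION & SPEC =====
-- A raises IndexError exactly when N > len(A); Pre_ excludes those inputs and nothing else.
def Pre_solve (N : Int) (A : List Int) : Prop := N ≤ (A.length : Int)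
instance (N : Int) (A : List Int) : Decidable (Pre_solve N A) := by unfold Pre_solve; infer_instance
def pvWitness_solve : Int × List Int := (3, [1, 2, 3])

-- When only the first N elements of a longer list are processed and the scan ends inside an even run
-- of length >= 2 (A[N-2] and A[N-1] both even, 2 <= N < len(A)), A's final flush 'A = A[:start] + list(tmp)'
-- silently drops the untouched tail A[N:], while B keeps it; keeping the unprocessed tail is the intended value.
def D_solve (N : Int) (A : List Int) : Prop :=
  2 ≤ N ∧ N < (A.length : Int) ∧
    (A.getD (N - 1).toNat 1) % 2 = 0 ∧ (A.getD (N - 2).toNat 1) % 2 = 0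
instance (N : Int) (A : List Int) : Decidable (D_solve N A) := by unfold D_solve; infer_instance

def Spec_solve (N : Int) (A : List Int) (out : String) : Prop := ¬ D_solve N A → out = solve_alt N A
instance (N : Int) (A : List Int) (out : String) : Decidable (Spec_solve N A out) := by
  unfold Spec_solve; infer_instance

def pvDiffWitness_solve : Int × List Int := (2, [2, 4, 7])
def pvDiffWitnessOut_solve : String × String := ("4 2", "4 2 7")

-- ===== CLAIM (what is proved, stated in full; the proofs are below) =====
def Claim_unchanged_solve : Prop :=
  ∀ (N : Int) (A : List Int), Dom_solve N A → Pre_solve N A → Spec_solve N A (solve N A)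
def Claim_changed_solve : Prop :=
  Dom_solve (pvDiffWitness_solve.1) (pvDiffWitness_solve.2) ∧
  Pre_solve (pvDiffWitness_solve.1) (pvDiffWitness_solve.2) ∧
  D_solve (pvDiffWitness_solve.1) (pvDiffWitness_solve.2) ∧
  solve (pvDiffWitness_solve.1) (pvDiffWitness_solve.2) = pvDiffWitnessOut_solve.1 ∧
  solve_alt (pvDiffWitness_solve.1) (pvDiffWitness_solve.2) = pvDiffWitnessOut_solve.2 ∧
  pvDiffWitnessOut_solve.1 ≠ pvDiffWitnessOut_solve.2
def Claim_exact_solve : Prop :=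
  ∀ (N : Int) (A : List Int), Dom_solve N A → Pre_solve N A → D_solve N A →
    solve N A ≠ solve_alt N A

-- ===== LEMMAS AND PROOFS =====

theorem drop_mid (L out run : List Int) (j : Nat) (hlen : out.length + run.length = j) :
    List.drop j (out ++ (run ++ L)) = L := by
  subst hlen
  simp [List.drop_append]

-- A's loop step on an invariant-shaped state, at an index holding an odd element
theorem solveStep_odd (N : Int) (L : List Int) (j : Nat) (hjl : j < L.length)
    (out run : List Int) (hlen : out.length + run.length = j)
    (hpar : ¬ PySem.Int.mod (L[j]) 2 = 0) :
    solveStep N L (out ++ run ++ L.drop j, run.reverse, if run = [] then -1 else (out.length : Int)) (j : Int)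
      = (out ++ run.reverse ++ L[j] :: L.drop (j + 1), [], -1) := by
  have hx : PySem.List.pyGetD L (j : Nat) 0 = L[j] := by
    simp [List.getD_eq_getElem?_getD, List.getElem?_eq_getElem hjl]
  rcases eq_or_ne run [] with hrun | hrun
  · subst hrun
    simp only [solveStep, hx, if_neg hpar]
    rw [if_neg (by simp)]
    rw [List.drop_eq_getElem_cons hjl]
    simp
  · simp only [solveStep, hx, if_neg hpar, if_neg hrun]
    rw [if_pos ⟨by simp [List.length_pos_iff, hrun], by positivity⟩]
    rcases eq_or_ne run.reverse.length 1 with h1 | h1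
    · rw [if_neg (by omega)]
      obtain ⟨y, hy⟩ : ∃ y, run = [y] := by
        rcases run with _ | ⟨y, ys⟩
        · simp_all
        · refine ⟨y, ?_⟩
          simp at h1
          simp [h1]
      subst hy
      rw [List.drop_eq_getElem_cons hjl]
      simp
    · have hgt : 1 < run.reverse.length := by
        have := List.length_pos_iff.2 hrun
        simp at h1 ⊢; omega
      rw [if_pos hgt]
      rw [PySem.List.slice_to_natCast, PySem.List.slice_from_natCast]
      have t1 : List.take out.length (out ++ (run ++ List.drop j L)) = out := by simp
      have t2 := drop_mid (List.drop j L) out run j hlen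
      simp only [List.append_assoc] at *
      rw [t1, t2, List.drop_eq_getElem_cons hjl]

-- A's loop step on an invariant-shaped state, at a non-final index holding an even element
theorem solveStep_even (N : Int) (L : List Int) (j : Nat) (hjl : j < L.length)
    (out run : List Int) (hlen : out.length + run.length = j) (hij : (j : Int) ≠ N - 1)
    (hpar : PySem.Int.mod (L[j]) 2 = 0) :
    solveStep N L (out ++ run ++ L.drop j, run.reverse, if run = [] then -1 else (out.length : Int)) (j : Int)
      = (out ++ (run ++ [L[j]]) ++ L.drop (j + 1), (run ++ [L[j]]).reverse, (out.length : Int)) := by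
  have hx : PySem.List.pyGetD L (j : Nat) 0 = L[j] := by
    simp [List.getD_eq_getElem?_getD, List.getElem?_eq_getElem hjl]
  simp only [solveStep, hx, if_pos hpar]
  rw [if_neg (by rintro ⟨-, h⟩; exact hij h)]
  rcases eq_or_ne run [] with hrun | hrun
  · subst hrun
    rw [if_pos rfl, List.drop_eq_getElem_cons hjl]
    simp at hlen
    simp [hlen]
  · rw [if_neg hrun, if_neg (by omega), List.drop_eq_getElem_cons hjl]
    simp

-- loop invariant: A's state after the first j iterations vs B's fold over the first j elements
theorem solve_inv (N : Int) (L : List Int) (j : Nat) (hj : (j : Int) ≤ N - 1) (hjl : j ≤ L.length)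
    (out run : List Int) (hb : (L.take j).foldl altStep ([], []) = (out, run)) :
    (PySem.List.pyRange 0 (j : Int) 1).foldl (solveStep N L) (L, [], -1)
      = (out ++ run ++ L.drop j, run.reverse, if run = [] then -1 else (out.length : Int))
    ∧ out.length + run.length = j
    ∧ run = (L.drop out.length).take run.length
    ∧ (∀ y ∈ run, PySem.Int.mod y 2 = 0)
    ∧ (run = [] → 0 < j → ¬ PySem.Int.mod (L.getD (j - 1) 1) 2 = 0) := by
  induction j generalizing out run with
  | zero =>
    simp at hb
    obtain ⟨h1, h2⟩ := hb
    subst h1; subst h2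
    simp
  | succ j ih =>
    have hjl' : j < L.length := by omega
    have hfold : ∀ st : List Int × List Int, (L.take (j+1)).foldl altStep st
        = altStep ((L.take j).foldl altStep st) L[j] := by
      intro st
      rw [List.take_add_one, List.getElem?_eq_getElem hjl']
      rw [Option.toList_some, List.foldl_append, List.foldl_cons, List.foldl_nil]
    obtain ⟨out0, run0, hb0⟩ : ∃ o r, (L.take j).foldl altStep ([], []) = (o, r) :=
      ⟨_, _, rfl⟩
    obtain ⟨h1, h2, h3, h4, h5⟩ := ih (by omega) (by omega) out0 run0 hb0
    rw [hfold, hb0] at hb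
    have hrange : PySem.List.pyRange 0 ((j+1 : Nat) : Int) 1
        = PySem.List.pyRange 0 (j : Int) 1 ++ [(j : Int)] := by
      push_cast
      exact PySem.List.pyRange_one_succ_right (by positivity)
    rw [hrange, List.foldl_append]
    simp only [List.foldl_cons, List.foldl_nil]
    rw [h1]
    by_cases hpar : PySem.Int.mod (L[j]) 2 = 0
    · rw [solveStep_even N L j hjl' out0 run0 h2 (by omega) hpar]
      rw [altStep, if_pos hpar] at hb
      simp only [Prod.mk.injEq] at hb
      obtain ⟨ho, hr⟩ := hb
      subst ho; subst hr
      refine ⟨by simp, by simp; omega, ?_, ?_, by simp⟩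
      · rw [show (run0 ++ [L[j]]).length = run0.length + 1 by simp, List.take_add_one]
        have : (L.drop out0.length)[run0.length]? = some L[j] := by
          rw [List.getElem?_drop, show out0.length + run0.length = j from h2,
            List.getElem?_eq_getElem hjl']
        rw [this]
        simp
        exact h3
      · intro y hy
        rcases List.mem_append.1 hy with h | h
        · exact h4 y h
        · simp at h; subst h; exact hpar
    · rw [solveStep_odd N L j hjl' out0 run0 h2 hpar]
      rw [altStep, if_neg hpar] at hb
      simp only [Prod.mk.injEq] at hb
      obtain ⟨ho, hr⟩ := hb
      subst ho; subst hr
      refine ⟨by simp, by simpa using h2.symm ▸ (by omega : out0.length + run0.length + 1 = j + 1),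
        by simp, by simp, ?_⟩
      intro _ _
      rw [show j + 1 - 1 = j from rfl, List.getD_eq_getElem?_getD, List.getElem?_eq_getElem hjl']
      exact hpar

theorem solve_eq_alt (N : Int) (A : List Int) (hpre : Pre_solve N A) (hD : ¬ D_solve N A) :
    solve N A = solve_alt N A := by
  simp only [solve, solve_alt]
  rcases (by omega : N ≤ 0 ∨ 0 < N) with hN | hN
  · have hr : PySem.List.pyRange 0 N 1 = [] := by
      rw [PySem.List.pyRange_zero]
      simp [Int.toNat_of_nonpos hN]
    have hmax : max N 0 = (0 : Int) := by omega
    rw [hr, hmax]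
    rw [show (0 : Int) = ((0 : Nat) : Int) from rfl, PySem.List.slice_to_natCast,
      PySem.List.slice_from_natCast]
    simp
  · have hpre' : N ≤ (A.length : Int) := hpre
    set j := (N - 1).toNat with hjdef
    have hjN : ((j : Nat) : Int) = N - 1 := by omega
    have hjl : j < A.length := by omega
    obtain ⟨out, run, hb⟩ : ∃ o r, (A.take j).foldl altStep ([], []) = (o, r) := ⟨_, _, rfl⟩
    obtain ⟨h1, h2, h3, h4, h5⟩ := solve_inv N A j (by omega) (by omega) out run hb
    have hNj : N = ((j + 1 : Nat) : Int) := by omega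
    have hrange : PySem.List.pyRange 0 N 1 = PySem.List.pyRange 0 (j : Int) 1 ++ [(j : Int)] := by
      rw [hNj]
      push_cast
      exact PySem.List.pyRange_one_succ_right (by positivity)
    have hmax : max N 0 = N := by omega
    have hsto : PySem.List.slice A none (some N) = A.take (j + 1) := by
      rw [hNj, PySem.List.slice_to_natCast]
    have hsfrom : PySem.List.slice A (some N) none = A.drop (j + 1) := by
      rw [hNj, PySem.List.slice_from_natCast]
    rw [hrange, List.foldl_append, List.foldl_cons, List.foldl_nil, h1, hmax, hsto, hsfrom]
    have hfold : (A.take (j + 1)).foldl altStep ([], []) = altStep (out, run) A[j] := by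
      rw [List.take_add_one, List.getElem?_eq_getElem hjl, Option.toList_some, List.foldl_append,
        hb, List.foldl_cons, List.foldl_nil]
    rw [hfold]
    have hx : PySem.List.pyGetD A ((j : Nat) : Int) 0 = A[j] := by
      simp [List.getD_eq_getElem?_getD, List.getElem?_eq_getElem hjl]
    by_cases hpar : PySem.Int.mod (A[j]) 2 = 0
    · rw [altStep, if_pos hpar]
      rcases eq_or_ne run [] with hrun | hrun
      · subst hrun
        simp only [solveStep, hx, if_pos hpar]
        rw [if_neg (by simp)]
        rw [List.drop_eq_getElem_cons hjl]
        simp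
      · -- the scan ends inside an even run of length ≥ 2: A flushes and (as ¬D_ forces N = len) B agrees
        have hrl : 0 < run.length := List.length_pos_iff.2 hrun
        have hlen : N = (A.length : Int) := by
          by_contra hne
          apply hD
          refine ⟨by omega, by omega, ?_, ?_⟩
          · rw [show (N - 1).toNat = j from rfl]
            rw [List.getD_eq_getElem?_getD, List.getElem?_eq_getElem hjl]
            simpa [PySem.Int.mod_eq_emod_of_pos (by norm_num : (0:Int) < 2)] using hpar
          · have hj1 : (N - 2).toNat = j - 1 := by omega
            have hjl1 : j - 1 < A.length := by omega
            rw [hj1, List.getD_eq_getElem?_getD, List.getElem?_eq_getElem hjl1]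
            have hmem : A[j - 1] ∈ run := by
              rw [h3]
              refine List.mem_iff_getElem.2 ⟨run.length - 1, ?_, ?_⟩
              · simp
                omega
              · rw [List.getElem_take, List.getElem_drop]
                congr 1
                omega
            have := h4 _ hmem
            simpa [PySem.Int.mod_eq_emod_of_pos (by norm_num : (0:Int) < 2)] using this
        have hdrop : A.drop (j + 1) = [] := by
          rw [List.drop_eq_nil_iff]
          omega
        simp only [solveStep, hx, if_pos hpar, if_neg hrun]
        rw [if_pos (show 1 < (A[j] :: run.reverse).length ∧ ((j : Nat) : Int) = N - 1 from
          ⟨by simp; omega, hjN⟩)]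
        rw [if_neg (show ¬((out.length : Int) = -1) by omega)]
        rw [PySem.List.slice_to_natCast]
        have t1 : List.take out.length (out ++ (run ++ List.drop j A)) = out := by simp
        simp only [List.append_assoc] at t1 ⊢
        rw [t1, hdrop]
        simp
    · rw [solveStep_odd N A j hjl out run h2 hpar]
      rw [altStep, if_neg hpar]
      simp

theorem join_len (sep x : List Char) (xs : List (List Char)) (y : List Char)
    (ys : List (List Char)) :
    (PySem.Chars.join sep ((x :: xs) ++ y :: ys)).length
      = (PySem.Chars.join sep (x :: xs)).length + sep.length
        + (PySem.Chars.join sep (y :: ys)).length := by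
  induction xs generalizing x with
  | nil =>
    rw [List.cons_append, List.nil_append, PySem.Chars.join_cons_cons, PySem.Chars.join_singleton]
    simp
    omega
  | cons a xs ih =>
    rw [List.cons_append, List.cons_append, PySem.Chars.join_cons_cons, ← List.cons_append,
      PySem.Chars.join_cons_cons]
    simp only [List.length_append]
    rw [ih a]
    omega

theorem join_ne_append (xs ys : List String) (hxs : xs ≠ []) (hys : ys ≠ []) :
    PySem.Str.join " " xs ≠ PySem.Str.join " " (xs ++ ys) := by
  intro h
  have hl := congrArg (fun s => s.toList.length) h
  simp only [PySem.Str.toList_join, List.map_append] at hl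
  rcases xs with _ | ⟨x, xs⟩
  · exact hxs rfl
  rcases ys with _ | ⟨y, ys⟩
  · exact hys rfl
  rw [List.map_cons, List.map_cons, join_len] at hl
  rw [show (" ".toList.length) = 1 from rfl] at hl
  omega

theorem solve_ne (N : Int) (A : List Int) (hpre : Pre_solve N A) (hD : D_solve N A) :
    solve N A ≠ solve_alt N A := by
  obtain ⟨hN2, hNlen, he1, he2⟩ := hD
  have hpre' : N ≤ (A.length : Int) := hpre
  simp only [solve, solve_alt]
  set j := (N - 1).toNat with hjdef
  have hjN : ((j : Nat) : Int) = N - 1 := by omega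
  have hjl : j < A.length := by omega
  have hj0 : 0 < j := by omega
  obtain ⟨out, run, hb⟩ : ∃ o r, (A.take j).foldl altStep ([], []) = (o, r) := ⟨_, _, rfl⟩
  obtain ⟨h1, h2, h3, h4, h5⟩ := solve_inv N A j (by omega) (by omega) out run hb
  have hpar : PySem.Int.mod A[j] 2 = 0 := by
    rw [List.getD_eq_getElem?_getD, List.getElem?_eq_getElem hjl] at he1
    rw [PySem.Int.mod_eq_emod_of_pos (by norm_num : (0:Int) < 2)]
    simpa using he1
  have hrun : run ≠ [] := by
    intro hnil
    apply h5 hnil hj0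
    have hj1l : j - 1 < A.length := by omega
    rw [show (N - 2).toNat = j - 1 by omega, List.getD_eq_getElem?_getD,
      List.getElem?_eq_getElem hj1l] at he2
    rw [List.getD_eq_getElem?_getD, List.getElem?_eq_getElem hj1l,
      PySem.Int.mod_eq_emod_of_pos (by norm_num : (0:Int) < 2)]
    simpa using he2
  have hNj : N = ((j + 1 : Nat) : Int) := by omega
  have hrange : PySem.List.pyRange 0 N 1 = PySem.List.pyRange 0 (j : Int) 1 ++ [(j : Int)] := by
    rw [hNj]
    push_cast
    exact PySem.List.pyRange_one_succ_right (by positivity)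
  have hmax : max N 0 = N := by omega
  have hsto : PySem.List.slice A none (some N) = A.take (j + 1) := by
    rw [hNj, PySem.List.slice_to_natCast]
  have hsfrom : PySem.List.slice A (some N) none = A.drop (j + 1) := by
    rw [hNj, PySem.List.slice_from_natCast]
  rw [hrange, List.foldl_append, List.foldl_cons, List.foldl_nil, h1, hmax, hsto, hsfrom]
  have hfold : (A.take (j + 1)).foldl altStep ([], []) = altStep (out, run) A[j] := by
    rw [List.take_add_one, List.getElem?_eq_getElem hjl, Option.toList_some, List.foldl_append,
      hb, List.foldl_cons, List.foldl_nil]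
  rw [hfold]
  have hx : PySem.List.pyGetD A ((j : Nat) : Int) 0 = A[j] := by
    simp [List.getD_eq_getElem?_getD, List.getElem?_eq_getElem hjl]
  rw [altStep, if_pos hpar]
  simp only [solveStep, hx, if_pos hpar, if_neg hrun]
  rw [if_pos (show 1 < (A[j] :: run.reverse).length ∧ ((j : Nat) : Int) = N - 1 from
    ⟨by simp [List.length_pos_iff, hrun], hjN⟩)]
  rw [if_neg (show ¬((out.length : Int) = -1) by omega)]
  rw [PySem.List.slice_to_natCast]
  have t1 : List.take out.length (out ++ (run ++ List.drop j A)) = out := by simp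
  simp only [List.append_assoc] at t1 ⊢
  rw [t1]
  have hdropne : A.drop (j + 1) ≠ [] := by
    simp only [ne_eq, List.drop_eq_nil_iff]
    omega
  have := join_ne_append ((out ++ A[j] :: run.reverse).map PySem.Int.toStr)
    ((A.drop (j + 1)).map PySem.Int.toStr) (by simp) (by simpa using hdropne)
  simpa using this

-- ===== VERDICT (by name: the statement is the Claim_ definition above) =====
theorem solve_spec : Claim_unchanged_solve := by
  intro N A _ hpre hD
  exact solve_eq_alt N A hpre hD

theorem solve_changed : Claim_changed_solve := by unfold Claim_changed_solve; decide

theorem solve_tight : Claim_exact_solve := by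
  intro N A _ hpre hD
  exact solve_ne N A hpre hD
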